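-- pv_equiv track=rewrite | github.com/vsthijs/strforth | strforth.py | nasm_string
-- ===== SOURCE A (Python) =====
-- def nasm_string(s: str) -> str:
--     """converts 'Hello World!\n' to 'Hello World!', 10 for nasm"""
--     special_chars = {"\t": 9, "\n": 10}
--     line = ""
--     instring = False
--     for ii in s:
--         if ii in special_chars:
--             if instring:
--                 line += '", '
--                 instring = False
--             line += f"{special_chars[ii]}, "
--         else:
--             if not instring:
--                 line += '"'
--                 instring = True
--             line += ii
--     if instring:
--         line += '"'
--     return line.removeprefix(", ")
-- ===== SOURCE B (Python) =====
-- def nasm_string(s: str) -> str: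
--     """converts 'Hello World!\n' to 'Hello World!', 10 for nasm"""
--     special_chars = {"\t": 9, "\n": 10}
--     tokens = []
--     i = 0
--     n = len(s)
--     while i < n:
--         c = s[i]
--         if c in special_chars:
--             tokens.append(str(special_chars[c]))
--             i += 1
--         else:
--             j = i + 1
--             while j < n and s[j] not in special_chars:
--                 j += 1
--             tokens.append('"' + s[i:j] + '"')
--             i = j
--     out = ", ".join(tokens)
--     if s and s[-1] in special_chars:
--         out += ", "
--     return out
-- ===== Notes on version B (the rewrite author's own statement) =====
-- stated objective: alternative
-- what changed: Replaces A's single character-by-character pass with an instring flag and incremental string concatenation by a run-based tokenizer: an inner index loop splits off each maximal non-special run, one token per run or special char is collected into a list, the tokens are joined with a comma-space separator, and a trailing separator is appended exactly when the string ends with a special character.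
import Mathlib
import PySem

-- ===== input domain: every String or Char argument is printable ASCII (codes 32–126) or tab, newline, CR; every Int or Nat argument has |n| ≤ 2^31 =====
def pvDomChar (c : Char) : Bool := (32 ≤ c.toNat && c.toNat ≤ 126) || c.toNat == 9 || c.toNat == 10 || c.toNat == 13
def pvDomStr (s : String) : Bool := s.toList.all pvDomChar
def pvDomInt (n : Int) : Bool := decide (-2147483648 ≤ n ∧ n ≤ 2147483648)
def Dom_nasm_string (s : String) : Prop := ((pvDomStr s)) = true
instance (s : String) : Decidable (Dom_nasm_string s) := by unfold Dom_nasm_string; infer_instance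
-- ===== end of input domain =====

-- B replaces A's per-character instring flag with a run-based tokenizer (token list + join + trailing rule); alternative decomposition, same result.

-- ===== PORT A =====
def pvSpecial : PySem.Dict Char Int := PySem.Dict.ofList [('\t', 9), ('\n', 10)]

-- one iteration of A's for-loop over state (line, instring)
def pvStepA (st : List Char × Bool) (ii : Char) : List Char × Bool :=
  if (pvSpecial.get? ii).isSome then
    let st1 := if st.2 then (st.1 ++ ['"', ',', ' '], false) else st
    (st1.1 ++ (PySem.Int.toChars (pvSpecial.getD ii 0) ++ [',', ' ']), false)
  else
    let st1 := if st.2 then st else (st.1 ++ ['"'], true)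
    (st1.1 ++ [ii], st1.2)

def nasm_string (s : String) : String :=
  let r := s.toList.foldl pvStepA ([], false)
  let line := if r.2 then r.1 ++ ['"'] else r.1
  -- line.removeprefix(", ")
  String.ofList (if line.take 2 = [',', ' '] then line.drop 2 else line)

-- ===== PORT B =====
def pvIsSpec (c : Char) : Bool := (pvSpecial.get? c).isSome

-- the inner while loop of B: split off the maximal leading run of non-special chars
def pvTakeRun : List Char → List Char × List Char
  | [] => ([], [])
  | c :: rest =>
    if pvIsSpec c then ([], c :: rest)
    else
      let p := pvTakeRun rest
      (c :: p.1, p.2)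

lemma pvTakeRun_snd_length : ∀ cs : List Char, (pvTakeRun cs).2.length ≤ cs.length := by
  intro cs
  induction cs with
  | nil => simp [pvTakeRun]
  | cons c rest ih =>
    by_cases h : pvIsSpec c
    · simp [pvTakeRun, h]
    · simp [pvTakeRun, h]; omega

-- the outer while loop of B: emit one token per special char / per maximal run
def pvTokens : List Char → List (List Char)
  | [] => []
  | c :: rest =>
    if pvIsSpec c then
      PySem.Int.toChars (pvSpecial.getD c 0) :: pvTokens rest
    else
      ('"' :: (c :: (pvTakeRun rest).1) ++ ['"']) :: pvTokens (pvTakeRun rest).2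
termination_by cs => cs.length
decreasing_by
  all_goals simp
  all_goals (have := pvTakeRun_snd_length rest; omega)

-- ", ".join(tokens)
def pvJoin : List (List Char) → List Char
  | [] => []
  | [t] => t
  | t :: t' :: ts => t ++ [',', ' '] ++ pvJoin (t' :: ts)

def nasm_string_alt (s : String) : String :=
  let cs := s.toList
  let out := pvJoin (pvTokens cs)
  String.ofList (match cs.getLast? with
    | some c => if pvIsSpec c then out ++ [',', ' '] else out
    | none => out)

-- ===== PRECONDITION & SPEC =====
def Spec_nasm_string (s : String) (out : String) : Prop := out = nasm_string_alt s
instance (s : String) (out : String) : Decidable (Spec_nasm_string s out) := by unfold Spec_nasm_string; infer_instance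

-- ===== CLAIM (what is proved, stated in full; the proofs are below) =====
def Claim_equal_nasm_string : Prop := ∀ (s : String), Dom_nasm_string s → Spec_nasm_string s (nasm_string s)

-- ===== LEMMAS AND PROOFS =====

-- what A's loop (plus final closing quote) appends when started with flag `instring`
def pvRender : Bool → List Char → List Char
  | instring, [] => if instring then ['"'] else []
  | instring, c :: cs =>
    if pvIsSpec c then
      (if instring then ['"', ',', ' '] else []) ++ PySem.Int.toChars (pvSpecial.getD c 0) ++ [',', ' '] ++ pvRender false cs
    else
      (if instring then [] else ['"']) ++ c :: pvRender true cs

-- the trailing ", " emitted exactly when the string ends with a special char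
def pvTrail (cs : List Char) : List Char :=
  match cs.getLast? with
  | some c => if pvIsSpec c then [',', ' '] else []
  | none => []

lemma pvIsSpec_iff (c : Char) : pvIsSpec c = true ↔ c = '\t' ∨ c = '\n' := by
  simp [pvIsSpec, pvSpecial, PySem.Dict.ofList, PySem.Dict.update, PySem.Dict.get?_insert]
  split_ifs <;> simp_all

lemma foldA_render : ∀ (cs line : List Char) (b : Bool),
    (if (cs.foldl pvStepA (line, b)).2 then (cs.foldl pvStepA (line, b)).1 ++ ['"']
     else (cs.foldl pvStepA (line, b)).1) = line ++ pvRender b cs := by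
  intro cs
  induction cs with
  | nil => intro line b; cases b <;> simp [pvRender]
  | cons c cs ih =>
    intro line b
    by_cases h : pvIsSpec c
    · have hs : (pvSpecial.get? c).isSome = true := h
      cases b <;> simp [List.foldl_cons, pvStepA, pvRender, h, hs, ih, List.append_assoc]
    · have hs : (pvSpecial.get? c).isSome = false := by simpa [pvIsSpec] using h
      cases b <;> simp [List.foldl_cons, pvStepA, pvRender, h, hs, ih, List.append_assoc]

lemma render_no_prefix : ∀ cs : List Char, ¬ (pvRender false cs).take 2 = [',', ' '] := by
  intro cs
  cases cs with
  | nil => simp [pvRender]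
  | cons c cs =>
    by_cases h : pvIsSpec c
    · have h9 : PySem.Int.toChars (pvSpecial.getD '\t' 0) = ['9'] := by decide
      have h10 : PySem.Int.toChars (pvSpecial.getD '\n' 0) = ['1', '0'] := by decide
      rcases (pvIsSpec_iff c).mp h with rfl | rfl <;> simp [pvRender, h, h9, h10]
    · simp [pvRender, h]

lemma pvTakeRun_append : ∀ cs : List Char, (pvTakeRun cs).1 ++ (pvTakeRun cs).2 = cs := by
  intro cs
  induction cs with
  | nil => simp [pvTakeRun]
  | cons c cs ih => by_cases h : pvIsSpec c <;> simp [pvTakeRun, h, ih]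

lemma pvTakeRun_fst_not_spec : ∀ cs : List Char, ∀ c ∈ (pvTakeRun cs).1, pvIsSpec c = false := by
  intro cs
  induction cs with
  | nil => simp [pvTakeRun]
  | cons c cs ih =>
    by_cases h : pvIsSpec c
    · simp [pvTakeRun, h]
    · intro x hx
      simp only [pvTakeRun, h, Bool.false_eq_true, ite_false, List.mem_cons] at hx
      rcases hx with rfl | hx
      · simpa using h
      · exact ih x hx

lemma pvTakeRun_snd_spec : ∀ (cs : List Char) (d : Char) (rest : List Char),
    (pvTakeRun cs).2 = d :: rest → pvIsSpec d = true := by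
  intro cs
  induction cs with
  | nil => intro d rest h; simp [pvTakeRun] at h
  | cons c cs ih =>
    intro d rest h
    by_cases hc : pvIsSpec c
    · simp [pvTakeRun, hc] at h
      rcases h with ⟨rfl, -⟩; exact hc
    · simp [pvTakeRun, hc] at h
      exact ih d rest h

lemma render_true_run : ∀ cs : List Char,
    pvRender true cs = (pvTakeRun cs).1 ++ '"' ::
      (if (pvTakeRun cs).2 = [] then [] else [',', ' '] ++ pvRender false (pvTakeRun cs).2) := by
  intro cs
  induction cs with
  | nil => simp [pvRender, pvTakeRun]
  | cons c cs ih =>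
    by_cases h : pvIsSpec c
    · simp [pvRender, pvTakeRun, h]
    · simp [pvRender, pvTakeRun, h, ih]

lemma pvTokens_ne_nil : ∀ cs : List Char, cs ≠ [] → pvTokens cs ≠ [] := by
  intro cs h
  cases cs with
  | nil => exact absurd rfl h
  | cons c cs => rw [pvTokens]; split <;> simp

lemma pvJoin_cons (t : List Char) (ts : List (List Char)) (h : ts ≠ []) :
    pvJoin (t :: ts) = t ++ [',', ' '] ++ pvJoin ts := by
  cases ts with
  | nil => exact absurd rfl h
  | cons t' ts => rfl

lemma pvTrail_cons (c : Char) (cs : List Char) (h : cs ≠ []) :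
    pvTrail (c :: cs) = pvTrail cs := by
  cases cs with
  | nil => exact absurd rfl h
  | cons d t => simp [pvTrail, List.getLast?_cons_cons]

lemma pvTrail_append (xs rem : List Char) (h : rem ≠ []) :
    pvTrail (xs ++ rem) = pvTrail rem := by
  simp [pvTrail, List.getLast?_append_of_ne_nil xs h]

lemma pvTrail_nonspec : ∀ cs : List Char, (∀ c ∈ cs, pvIsSpec c = false) → pvTrail cs = [] := by
  intro cs
  induction cs with
  | nil => intro _; simp [pvTrail]
  | cons c cs ih =>
    intro h
    cases cs with
    | nil => simp [pvTrail, h c (by simp)]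
    | cons d t =>
      rw [pvTrail_cons c _ (by simp)]
      exact ih (fun x hx => h x (List.mem_cons_of_mem c hx))

lemma render_eq_tokens : ∀ cs : List Char,
    pvRender false cs = pvJoin (pvTokens cs) ++ pvTrail cs
  | [] => by simp [pvRender, pvTokens, pvJoin, pvTrail]
  | c :: cs => by
    by_cases h : pvIsSpec c
    · rw [pvTokens]
      simp only [h, if_true]
      cases cs with
      | nil =>
        simp [pvRender, pvTokens, pvJoin, pvTrail, h]
      | cons d t =>
        rw [pvJoin_cons _ _ (pvTokens_ne_nil _ (by simp)), pvTrail_cons _ _ (by simp)]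
        have hR : pvRender false (c :: d :: t) =
            PySem.Int.toChars (pvSpecial.getD c 0) ++ [',', ' '] ++ pvRender false (d :: t) := by
          simp [pvRender, h]
        rw [hR, render_eq_tokens (d :: t)]
        simp [List.append_assoc]
    · have hsplit := pvTakeRun_append cs
      rcases hrem : (pvTakeRun cs).2 with _ | ⟨d, t⟩
      · -- the whole string is one non-special run
        have hfst : (pvTakeRun cs).1 = cs := by
          rw [hrem] at hsplit; simpa using hsplit
        have hall : ∀ x ∈ c :: cs, pvIsSpec x = false := by
          intro x hx
          rcases List.mem_cons.mp hx with rfl | hx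
          · simpa using h
          · exact pvTakeRun_fst_not_spec cs x (by rw [hfst]; exact hx)
        have hR : pvRender false (c :: cs) = '"' :: c :: pvRender true cs := by
          simp [pvRender, h]
        rw [pvTokens]
        simp only [h, Bool.false_eq_true, if_false]
        rw [hrem, pvTrail_nonspec _ hall, hR, render_true_run cs, hrem]
        simp [pvTokens, pvJoin]
      · -- run, then a special char d
        have hd : pvIsSpec d = true := pvTakeRun_snd_spec cs d t hrem
        rw [hrem] at hsplit
        rw [pvTokens]
        simp only [h, Bool.false_eq_true, if_false]
        rw [hrem, pvJoin_cons _ _ (pvTokens_ne_nil _ (by simp))]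
        have htr : pvTrail (c :: cs) = pvTrail (d :: t) := by
          rw [pvTrail_cons c cs (by rw [← hsplit]; simp), ← hsplit,
            pvTrail_append _ _ (by simp)]
        have hR : pvRender false (c :: cs) = '"' :: c :: pvRender true cs := by
          simp [pvRender, h]
        rw [htr, hR, render_true_run cs, hrem, render_eq_tokens (d :: t)]
        simp [List.append_assoc]
  termination_by cs => cs.length
  decreasing_by
  · simp
  · have h1 := pvTakeRun_snd_length cs
    rw [hrem] at h1
    simp at h1 ⊢
    omega

-- ===== VERDICT (by name: the statement is the Claim_ definition above) =====
theorem nasm_string_spec : Claim_equal_nasm_string := by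
  intro s _
  unfold Spec_nasm_string nasm_string nasm_string_alt
  simp only []
  rw [foldA_render s.toList [] false]
  simp only [List.nil_append]
  rw [if_neg (render_no_prefix s.toList), render_eq_tokens s.toList]
  cases hl : s.toList.getLast? with
  | none => simp [pvTrail, hl]
  | some c =>
    by_cases h : pvIsSpec c <;> simp [pvTrail, hl, h]
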